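-- pv_equiv track=rewrite | github.com/that-data-scientist/algorithmic | leetcode/graphs/jump_game_3.py | dfs
-- ===== SOURCE A (Python) =====
-- def dfs(arr, current_pos, visited):
--     if current_pos >= len(arr) or current_pos < 0:
--         return False
--
--     if current_pos in visited:
--         return False
--
--     if arr[current_pos] == 0:
--         return True
--
--     visited.add(current_pos)
--     neighbors = [
--         current_pos + arr[current_pos],
--         current_pos - arr[current_pos]
--     ]
--
--     can_reach = False
--
--     for neighbor in neighbors:
--         can_reach = can_reach or dfs(arr, neighbor, visited)
--
--     return can_reach
-- ===== SOURCE B (Python) =====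
-- def dfs(arr, current_pos, visited):
--     stack = [current_pos]
--     while stack:
--         pos = stack.pop()
--         if pos >= len(arr) or pos < 0 or pos in visited:
--             continue
--         if arr[pos] == 0:
--             return True
--         visited.add(pos)
--         stack.append(pos - arr[pos])
--         stack.append(pos + arr[pos])
--     return False
-- ===== Notes on version B (the rewrite author's own statement) =====
-- stated objective: alternative
-- what changed: Replaced the recursive preorder DFS (one call per position with a short-circuiting 'or' over the two neighbors) by an iterative DFS with a single while loop over an explicit stack, pushing pos-arr[pos] then pos+arr[pos] so pos+arr[pos] is popped first; same visited mutation and same result.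
import Mathlib
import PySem

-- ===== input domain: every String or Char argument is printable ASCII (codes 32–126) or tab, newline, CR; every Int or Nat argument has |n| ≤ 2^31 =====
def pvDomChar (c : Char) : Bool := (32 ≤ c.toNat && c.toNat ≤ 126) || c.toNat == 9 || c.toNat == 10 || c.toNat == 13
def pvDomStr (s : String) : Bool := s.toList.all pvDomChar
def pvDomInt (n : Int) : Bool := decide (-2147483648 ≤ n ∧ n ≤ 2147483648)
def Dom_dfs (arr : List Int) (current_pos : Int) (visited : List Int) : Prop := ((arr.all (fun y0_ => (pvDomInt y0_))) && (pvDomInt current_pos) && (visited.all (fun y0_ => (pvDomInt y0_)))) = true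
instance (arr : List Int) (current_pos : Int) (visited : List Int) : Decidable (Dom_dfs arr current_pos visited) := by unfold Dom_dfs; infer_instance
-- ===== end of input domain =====

-- B replaces A's recursive preorder DFS by an iterative DFS over an explicit stack (alternative
-- decomposition, same cost). Both mutate the Python 'visited' set identically; the equivalence
-- proved here is about the RETURN value only.

-- ===== PORT A =====
-- number of in-range indices not yet visited: bounds the recursion depth of A
-- (fuel guard only; with fuel > unvisited the fuel branch is never reached)
def unvisitedCount (arr : List Int) (vis : List Int) : Nat :=
  (List.range arr.length).countP (fun i : Nat => decide (¬ ((i : Int) ∈ vis)))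

-- literal transliteration of A's recursion; the Python set 'visited' is threaded as a
-- PySem.Set Int value, the 'for neighbor in neighbors' loop with the short-circuiting
-- 'can_reach or dfs(...)' is unrolled into its two sequential iterations
def dfsAuxA (arr : List Int) : Nat → Int → List Int → Bool × List Int
  | 0, _, visited => (false, visited)   -- fuel guard, never reached (fuel > unvisitedCount)
  | f + 1, current_pos, visited =>
    if (arr.length : Int) ≤ current_pos ∨ current_pos < 0 then (false, visited)
    else if current_pos ∈ visited then (false, visited)
    else if PySem.List.pyGetD arr current_pos 0 = 0 then (true, visited)
    else
      let a := PySem.List.pyGetD arr current_pos 0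
      let vis1 := PySem.Set.add visited current_pos
      let r1 := dfsAuxA arr f (current_pos + a) vis1        -- first neighbor
      if r1.1 then (true, r1.2)                             -- can_reach or … short-circuits
      else dfsAuxA arr f (current_pos - a) r1.2             -- second neighbor

def dfs (arr : List Int) (current_pos : Int) (visited : List Int) : Bool :=
  (dfsAuxA arr (arr.length + 1) current_pos visited).1

-- ===== PORT B =====
-- helper lemma cited by stackRunB's decreasing_by
theorem countP_lt_aux {α : Type} (p q : α → Bool) (a0 : α)
    (h : ∀ a, p a = true → q a = true) (hq : q a0 = true) (hp : p a0 = false) :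
    ∀ l : List α, a0 ∈ l → l.countP p < l.countP q := by
  intro l hl
  induction l with
  | nil => simp at hl
  | cons x xs ih =>
    have hle : xs.countP p ≤ xs.countP q := List.countP_mono_left (fun a _ => h a)
    rcases List.mem_cons.mp hl with hx | hx
    · subst hx
      simp [List.countP_cons, hp, hq]
      omega
    · have := ih hx
      simp only [List.countP_cons]
      by_cases hpx : p x = true
      · simp [hpx, h x hpx]; omega
      · simp only [Bool.not_eq_true] at hpx
        simp only [hpx]
        by_cases hqx : q x = true <;> simp [hqx] <;> omega

theorem unvisited_add_lt (arr : List Int) (vis : List Int) (pos : Int)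
    (h0 : 0 ≤ pos) (h1 : pos < (arr.length : Int)) (h2 : pos ∉ vis) :
    unvisitedCount arr (PySem.Set.add vis pos) < unvisitedCount arr vis := by
  unfold unvisitedCount
  apply countP_lt_aux _ _ pos.toNat
  · intro a ha
    simp only [decide_eq_true_eq] at ha ⊢
    intro hmem
    exact ha (by simp [PySem.Set.mem_add]; exact Or.inl hmem)
  · simp only [decide_eq_true_eq, Int.toNat_of_nonneg h0]
    exact h2
  · simp only [decide_eq_false_iff_not, not_not, Int.toNat_of_nonneg h0]
    simp [PySem.Set.mem_add]
  · simp only [List.mem_range]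
    omega

-- literal transliteration of B's while loop over the explicit stack (head of the list = top)
def stackRunB (arr : List Int) (stack : List Int) (vis : List Int) : Bool :=
  match stack with
  | [] => false
  | pos :: rest =>
    if (arr.length : Int) ≤ pos ∨ pos < 0 ∨ pos ∈ vis then stackRunB arr rest vis
    else if PySem.List.pyGetD arr pos 0 = 0 then true
    else stackRunB arr
      ((pos + PySem.List.pyGetD arr pos 0) :: (pos - PySem.List.pyGetD arr pos 0) :: rest)
      (PySem.Set.add vis pos)
termination_by 2 * unvisitedCount arr vis + stack.length
decreasing_by
  · simp only [List.length_cons]; omega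
  · rename_i h1 h2
    push_neg at h1
    have := unvisited_add_lt arr vis pos (by omega) (by omega) h1.2.2
    simp only [List.length_cons]
    omega

def dfs_alt (arr : List Int) (current_pos : Int) (visited : List Int) : Bool :=
  stackRunB arr [current_pos] visited

-- ===== PRECONDITION & SPEC =====
def Spec_dfs (arr : List Int) (current_pos : Int) (visited : List Int) (out : Bool) : Prop := out = dfs_alt arr current_pos visited
instance (arr : List Int) (current_pos : Int) (visited : List Int) (out : Bool) : Decidable (Spec_dfs arr current_pos visited out) := by unfold Spec_dfs; infer_instance

-- ===== CLAIM (what is proved, stated in full; the proofs are below) =====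
def Claim_equal_dfs : Prop := ∀ (arr : List Int) (current_pos : Int) (visited : List Int), Dom_dfs arr current_pos visited → Spec_dfs arr current_pos visited (dfs arr current_pos visited)

-- ===== LEMMAS AND PROOFS =====

-- unfolding lemmas for the visiting step of A's recursion
theorem dfsAuxA_succ_true (arr : List Int) (f : Nat) (pos : Int) (vis : List Int)
    (h1 : ¬((arr.length : Int) ≤ pos ∨ pos < 0)) (h2 : pos ∉ vis)
    (h3 : ¬ PySem.List.pyGetD arr pos 0 = 0)
    (hb : (dfsAuxA arr f (pos + PySem.List.pyGetD arr pos 0) (PySem.Set.add vis pos)).1 = true) :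
    dfsAuxA arr (f + 1) pos vis =
      (true, (dfsAuxA arr f (pos + PySem.List.pyGetD arr pos 0) (PySem.Set.add vis pos)).2) := by
  simp only [dfsAuxA]
  rw [if_neg h1, if_neg h2, if_neg h3]
  simp [hb]

theorem dfsAuxA_succ_false (arr : List Int) (f : Nat) (pos : Int) (vis : List Int)
    (h1 : ¬((arr.length : Int) ≤ pos ∨ pos < 0)) (h2 : pos ∉ vis)
    (h3 : ¬ PySem.List.pyGetD arr pos 0 = 0)
    (hb : (dfsAuxA arr f (pos + PySem.List.pyGetD arr pos 0) (PySem.Set.add vis pos)).1 = false) :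
    dfsAuxA arr (f + 1) pos vis =
      dfsAuxA arr f (pos - PySem.List.pyGetD arr pos 0)
        (dfsAuxA arr f (pos + PySem.List.pyGetD arr pos 0) (PySem.Set.add vis pos)).2 := by
  simp only [dfsAuxA]
  rw [if_neg h1, if_neg h2, if_neg h3]
  simp [hb]

-- A's recursion only ever grows the visited set
theorem dfsAuxA_subset (arr : List Int) (f : Nat) (pos : Int) (vis : List Int) :
    ∀ x ∈ vis, x ∈ (dfsAuxA arr f pos vis).2 := by
  induction f generalizing pos vis with
  | zero => intro x hx; simpa [dfsAuxA] using hx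
  | succ f ih =>
    intro x hx
    by_cases h1 : (arr.length : Int) ≤ pos ∨ pos < 0
    · simpa [dfsAuxA, h1] using hx
    · by_cases h2 : pos ∈ vis
      · simpa [dfsAuxA, h1, h2] using hx
      · by_cases h3 : PySem.List.pyGetD arr pos 0 = 0
        · simpa [dfsAuxA, h1, h2, h3] using hx
        · have h1x : x ∈ PySem.Set.add vis pos := by
            simp [PySem.Set.mem_add]; exact Or.inl hx
          have h2x := ih (pos + PySem.List.pyGetD arr pos 0) (PySem.Set.add vis pos) x h1x
          by_cases hr : (dfsAuxA arr f (pos + PySem.List.pyGetD arr pos 0)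
              (PySem.Set.add vis pos)).1 = true
          · rw [dfsAuxA_succ_true arr f pos vis h1 h2 h3 hr]
            exact h2x
          · rw [dfsAuxA_succ_false arr f pos vis h1 h2 h3 (by simpa using hr)]
            exact ih (pos - PySem.List.pyGetD arr pos 0) _ x h2x

theorem unvisited_anti (arr : List Int) (v1 v2 : List Int) (h : ∀ x ∈ v1, x ∈ v2) :
    unvisitedCount arr v2 ≤ unvisitedCount arr v1 := by
  unfold unvisitedCount
  apply List.countP_mono_left
  intro a _ ha
  simp only [decide_eq_true_eq] at ha ⊢
  intro hmem
  exact ha (h _ hmem)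

theorem dfsAuxA_unvisited_le (arr : List Int) (f : Nat) (pos : Int) (vis : List Int) :
    unvisitedCount arr (dfsAuxA arr f pos vis).2 ≤ unvisitedCount arr vis :=
  unvisited_anti arr vis _ (dfsAuxA_subset arr f pos vis)

-- the simulation: one stack frame of B computes A's call, carrying A's updated visited set
theorem sim (arr : List Int) (f : Nat) : ∀ (pos : Int) (vis rest : List Int),
    unvisitedCount arr vis < f →
    stackRunB arr (pos :: rest) vis =
      (if (dfsAuxA arr f pos vis).1 then true
       else stackRunB arr rest (dfsAuxA arr f pos vis).2) := by
  induction f with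
  | zero => intro pos vis rest h; omega
  | succ f ih =>
    intro pos vis rest hf
    rw [stackRunB]
    simp only [dfsAuxA]
    by_cases h1 : (arr.length : Int) ≤ pos ∨ pos < 0
    · rw [if_pos (by tauto), if_pos h1]; simp
    · by_cases h2 : pos ∈ vis
      · rw [if_pos (by tauto), if_neg h1, if_pos h2]; simp
      · rw [if_neg (by tauto), if_neg h1, if_neg h2]
        by_cases h3 : PySem.List.pyGetD arr pos 0 = 0
        · rw [if_pos h3, if_pos h3]; simp
        · rw [if_neg h3, if_neg h3]
          push_neg at h1
          have hdec : unvisitedCount arr (PySem.Set.add vis pos) < unvisitedCount arr vis :=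
            unvisited_add_lt arr vis pos (by omega) (by omega) h2
          have hf1 : unvisitedCount arr (PySem.Set.add vis pos) < f := by omega
          rw [ih (pos + PySem.List.pyGetD arr pos 0) (PySem.Set.add vis pos)
              ((pos - PySem.List.pyGetD arr pos 0) :: rest) hf1]
          by_cases hb1 : (dfsAuxA arr f (pos + PySem.List.pyGetD arr pos 0)
              (PySem.Set.add vis pos)).1 = true
          · simp [hb1]
          · have hf2 : unvisitedCount arr (dfsAuxA arr f (pos + PySem.List.pyGetD arr pos 0)
                (PySem.Set.add vis pos)).2 < f := by
              have := dfsAuxA_unvisited_le arr f (pos + PySem.List.pyGetD arr pos 0)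
                (PySem.Set.add vis pos)
              omega
            rw [if_neg (by simp [hb1]),
              ih (pos - PySem.List.pyGetD arr pos 0) _ rest hf2]
            simp [hb1]

theorem unvisited_le_len (arr : List Int) (vis : List Int) :
    unvisitedCount arr vis ≤ arr.length := by
  unfold unvisitedCount
  have h := List.countP_le_length (l := List.range arr.length)
    (p := fun i : Nat => decide (¬ ((i : Int) ∈ vis)))
  simpa using h

-- ===== VERDICT (by name: the statement is the Claim_ definition above) =====
theorem dfs_spec : Claim_equal_dfs := by
  intro arr current_pos visited _
  unfold Spec_dfs dfs dfs_alt
  have h := sim arr (arr.length + 1) current_pos visited []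
    (by have := unvisited_le_len arr visited; omega)
  rw [h]
  by_cases hb : (dfsAuxA arr (arr.length + 1) current_pos visited).1
  · simp [hb]
  · simp [hb, stackRunB]
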